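-- pv_equiv track=rewrite | github.com/awillard1/burp-extensions | id_hash.py | _englishy
-- ===== SOURCE A (Python) =====
-- PRINTABLE_CHARS = set([ord(c) for c in (
--     "ABCDEFGHIJKLMNOPQRSTUVWXYZabcdefghijklmnopqrstuvwxyz0123456789 .,:;+-/_=!@#$%^&*()[]{}<>?\\|\"'`~\t\r\n"
-- )])
--
-- def _printable_ratio(bs):
--     """Calculate the ratio of printable characters in a bytearray."""
--     try:
--         if not bs:
--             return 0.0
--         pr = sum(1 for b in bs if b in PRINTABLE_CHARS)
--         return float(pr) / len(bs)
--     except (TypeError, ZeroDivisionError):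
--         return 0.0
--
-- def _englishy(bs):
--     """Check if a bytearray resembles English text based on letter, space, and vowel ratios."""
--     try:
--         s = ''.join(chr(b) for b in bs)
--         if not s:
--             return False
--         n = float(len(s))
--         letters = sum(1 for ch in s if ('A' <= ch <= 'Z') or ('a' <= ch <= 'z'))
--         spaces = s.count(' ')
--         vowels = sum(1 for ch in s.lower() if ch in 'aeiou')
--         alpha_ratio = letters / n
--         space_ratio = spaces / n
--         vowel_ratio = (float(vowels) / letters) if letters else 0.0
--         pr = _printable_ratio([ord(c) for c in s])
--         return pr >= 0.9 and alpha_ratio >= 0.6 and space_ratio >= 0.02 and 0.25 <= vowel_ratio <= 0.5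
--     except (TypeError, UnicodeDecodeError, ZeroDivisionError):
--         return False
-- ===== SOURCE B (Python) =====
-- PRINTABLE_CHARS = set([ord(c) for c in (
--     "ABCDEFGHIJKLMNOPQRSTUVWXYZabcdefghijklmnopqrstuvwxyz0123456789 .,:;+-/_=!@#$%^&*()[]{}<>?\\|\"'`~\t\r\n"
-- )])
--
-- def _englishy(bs):
--     """One fused pass: count length, printable, letters, spaces and vowels together."""
--     n = printable = letters = spaces = vowels = 0
--     try:
--         for b in bs:
--             c = chr(b)
--             n += 1
--             if b in PRINTABLE_CHARS:
--                 printable += 1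
--             if 'A' <= c <= 'Z' or 'a' <= c <= 'z':
--                 letters += 1
--             if c == ' ':
--                 spaces += 1
--             if c.lower() in 'aeiou':
--                 vowels += 1
--     except TypeError:
--         return False
--     if n == 0:
--         return False
--     fn = float(n)
--     pr = printable / fn
--     alpha_ratio = letters / fn
--     space_ratio = spaces / fn
--     vowel_ratio = (float(vowels) / letters) if letters else 0.0
--     return pr >= 0.9 and alpha_ratio >= 0.6 and space_ratio >= 0.02 and 0.25 <= vowel_ratio <= 0.5
-- ===== Notes on version B (the rewrite author's own statement) =====
-- stated objective: simpler
-- what changed: One fused counting loop over bs (length, printable, letters, spaces, vowels accumulated together) replaces A's string build, four separate scans and the _printable_ratio helper call.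
-- outside the precondition, e.g. on _englishy([304]): A returns False, B returns False
import Mathlib
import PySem

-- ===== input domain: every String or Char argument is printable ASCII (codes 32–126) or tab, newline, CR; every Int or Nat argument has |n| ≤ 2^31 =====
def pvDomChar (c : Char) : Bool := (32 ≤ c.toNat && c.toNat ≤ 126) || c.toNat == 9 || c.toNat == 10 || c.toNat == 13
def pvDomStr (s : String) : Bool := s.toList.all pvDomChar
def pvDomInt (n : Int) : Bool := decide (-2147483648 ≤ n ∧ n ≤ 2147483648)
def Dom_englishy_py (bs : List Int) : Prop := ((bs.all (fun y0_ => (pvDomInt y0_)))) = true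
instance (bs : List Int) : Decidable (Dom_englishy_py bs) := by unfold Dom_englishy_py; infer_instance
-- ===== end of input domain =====

-- B replaces A's string build plus four separate scans and a helper call by one fused counting
-- loop (simpler decomposition, same O(n) cost).  Both ports render Python's float threshold
-- tests (pr >= 0.9 etc.) as integer cross-multiplications; this is exact for any list of fewer
-- than 2^40 elements, since a ratio p/n then never lies strictly between a threshold and its
-- nearest double.  chr(b) is ported as Char.ofNat b.toNat, exact on the 0–255 range Pre_ admits.

-- ===== PORT A =====
-- PRINTABLE_CHARS = set(ord(c) for c in "…")
def pvPrintableSet : PySem.Set Int :=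
  PySem.Set.ofList
    (("ABCDEFGHIJKLMNOPQRSTUVWXYZabcdefghijklmnopqrstuvwxyz0123456789 .,:;+-/_=!@#$%^&*()[]{}<>?\\|\"'`~\t\r\n").toList.map
      (fun c => (c.toNat : Int)))

-- _printable_ratio: the float it returns is represented exactly as (numerator, denominator)
def printable_ratio_py (bs : List Int) : Int × Int :=
  if bs.isEmpty then (0, 1)   -- 0.0
  else ((bs.map (fun b => if pvPrintableSet.contains b then (1 : Int) else 0)).sum,
        (bs.length : Int))

def englishy_py (bs : List Int) : Bool :=
  let s : List Char := bs.map (fun b => Char.ofNat b.toNat)        -- ''.join(chr(b) for b in bs)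
  if s.isEmpty then false
  else
    let n : Int := (s.length : Int)
    let letters : Int :=
      (s.map (fun ch => if ('A' ≤ ch && ch ≤ 'Z') || ('a' ≤ ch && ch ≤ 'z') then (1 : Int) else 0)).sum
    let spaces : Int := (PySem.Chars.count s [' '] : Int)          -- s.count(' ')
    let vowels : Int :=
      ((PySem.Chars.lower s).map (fun ch => if PySem.Chars.isIn [ch] ['a','e','i','o','u'] then (1 : Int) else 0)).sum
    let pr : Int × Int := printable_ratio_py (s.map (fun c => (c.toNat : Int)))
    -- pr >= 0.9 and alpha_ratio >= 0.6 and space_ratio >= 0.02 and 0.25 <= vowel_ratio <= 0.5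
    decide (9 * pr.2 ≤ 10 * pr.1) &&
    decide (3 * n ≤ 5 * letters) &&
    decide (n ≤ 50 * spaces) &&
    (if letters = 0 then false else decide (letters ≤ 4 * vowels) && decide (2 * vowels ≤ letters))

-- ===== PORT B =====
def englishy_py_alt (bs : List Int) : Bool :=
  let st : Int × Int × Int × Int × Int :=
    bs.foldl (fun st b =>
      let c := Char.ofNat b.toNat                                   -- c = chr(b)
      (st.1 + 1,
       st.2.1 + (if pvPrintableSet.contains b then 1 else 0),
       st.2.2.1 + (if ('A' ≤ c && c ≤ 'Z') || ('a' ≤ c && c ≤ 'z') then 1 else 0),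
       st.2.2.2.1 + (if c == ' ' then 1 else 0),
       st.2.2.2.2 + (if PySem.Chars.isIn (PySem.Chars.lower [c]) ['a','e','i','o','u'] then 1 else 0)))
      (0, 0, 0, 0, 0)
  if st.1 = 0 then false
  else
    decide (9 * st.1 ≤ 10 * st.2.1) &&
    decide (3 * st.1 ≤ 5 * st.2.2.1) &&
    decide (st.1 ≤ 50 * st.2.2.2.1) &&
    (if st.2.2.1 = 0 then false
     else decide (st.2.2.1 ≤ 4 * st.2.2.2.2) && decide (2 * st.2.2.2.2 ≤ st.2.2.1))

-- ===== PRECONDITION & SPEC =====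
-- Pre_ keeps every element a byte (0..255): outside it chr raises an uncaught ValueError
-- (negative or > 0x10FFFF), or chr(b) leaves the Latin-1 range where Python's full Unicode
-- case mapping (e.g. chr(304).lower() = 'i̇') is outside the ASCII string model of the port.
def Pre_englishy_py (bs : List Int) : Prop := ∀ b ∈ bs, 0 ≤ b ∧ b ≤ 255
instance (bs : List Int) : Decidable (Pre_englishy_py bs) := by unfold Pre_englishy_py; infer_instance

def pvWitness_englishy_py : List Int :=
  [116, 104, 101, 32, 114, 97, 105, 110, 32, 105, 110, 32, 115, 112, 97, 105, 110]

def Spec_englishy_py (bs : List Int) (out : Bool) : Prop := out = englishy_py_alt bs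
instance (bs : List Int) (out : Bool) : Decidable (Spec_englishy_py bs out) := by unfold Spec_englishy_py; infer_instance

-- ===== CLAIM (what is proved, stated in full; the proofs are below) =====
def Claim_equal_englishy_py : Prop :=
  ∀ (bs : List Int), Dom_englishy_py bs → Pre_englishy_py bs → Spec_englishy_py bs (englishy_py bs)

-- ===== LEMMAS AND PROOFS =====

-- the common verdict both ports compute from the five counters
def pvVerdict (n p l sp v : Int) : Bool :=
  if n = 0 then false
  else
    decide (9 * n ≤ 10 * p) && decide (3 * n ≤ 5 * l) && decide (n ≤ 50 * sp) &&
    (if l = 0 then false else decide (l ≤ 4 * v) && decide (2 * v ≤ l))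

theorem pv_count_go_singleton (c : Char) (l : List Char) (acc : Nat) :
    PySem.Chars.count.go [c] l.length l acc = acc + l.countP (· == c) := by
  induction l generalizing acc with
  | nil => simp [PySem.Chars.count.go]
  | cons h t ih =>
    by_cases hc : c = h
    · subst hc
      simp [PySem.Chars.count.go, List.isPrefixOf, ih]
      omega
    · have hc' : ¬ h = c := fun e => hc e.symm
      simp [PySem.Chars.count.go, List.isPrefixOf, hc, hc', ih]

theorem pv_count_singleton (c : Char) (l : List Char) :
    PySem.Chars.count l [c] = l.countP (· == c) := by
  simpa [PySem.Chars.count] using pv_count_go_singleton c l 0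

theorem pv_toNat_chr {b : Int} (h0 : 0 ≤ b) (h1 : b ≤ 255) :
    ((Char.ofNat b.toNat).toNat : Int) = b := by
  have hv : b.toNat.isValidChar := by
    left
    omega
  simp [Char.toNat_ofNat, hv, h0]

theorem pv_fold_spec (step : Int × Int × Int × Int × Int → Int → Int × Int × Int × Int × Int)
    (hstep : step = fun st b =>
      let c := Char.ofNat b.toNat
      (st.1 + 1,
       st.2.1 + (if pvPrintableSet.contains b then 1 else 0),
       st.2.2.1 + (if ('A' ≤ c && c ≤ 'Z') || ('a' ≤ c && c ≤ 'z') then 1 else 0),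
       st.2.2.2.1 + (if c == ' ' then 1 else 0),
       st.2.2.2.2 + (if PySem.Chars.isIn (PySem.Chars.lower [c]) ['a','e','i','o','u'] then 1 else 0)))
    (bs : List Int) (a p l sp v : Int) :
    bs.foldl step (a, p, l, sp, v) =
      (a + bs.length,
       p + bs.countP pvPrintableSet.contains,
       l + bs.countP (fun x =>
             ('A' ≤ Char.ofNat x.toNat && Char.ofNat x.toNat ≤ 'Z') ||
             ('a' ≤ Char.ofNat x.toNat && Char.ofNat x.toNat ≤ 'z')),
       sp + bs.countP (fun x => Char.ofNat x.toNat == ' '),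
       v + bs.countP (fun x =>
             PySem.Chars.isIn [PySem.Chars.lowerChar (Char.ofNat x.toNat)] ['a','e','i','o','u'])) := by
  subst hstep
  induction bs generalizing a p l sp v with
  | nil => simp
  | cons x t ih =>
    simp only [List.foldl_cons]
    rw [ih]
    simp only [List.countP_cons, List.length_cons, PySem.Chars.lower, List.map_cons,
      List.map_nil, Prod.mk.injEq]
    push_cast
    refine ⟨by ring, ?_, ?_, ?_, ?_⟩ <;> (split_ifs <;> push_cast <;> ring)

theorem pv_alt_eq (bs : List Int) :
    englishy_py_alt bs =
      pvVerdict (bs.length : Int)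
        (bs.countP pvPrintableSet.contains : Int)
        (bs.countP (fun x =>
             ('A' ≤ Char.ofNat x.toNat && Char.ofNat x.toNat ≤ 'Z') ||
             ('a' ≤ Char.ofNat x.toNat && Char.ofNat x.toNat ≤ 'z')) : Int)
        (bs.countP (fun x => Char.ofNat x.toNat == ' ') : Int)
        (bs.countP (fun x =>
             PySem.Chars.isIn [PySem.Chars.lowerChar (Char.ofNat x.toNat)] ['a','e','i','o','u']) : Int) := by
  simp only [englishy_py_alt]
  rw [pv_fold_spec _ rfl]
  simp [pvVerdict]

theorem pv_a_eq (bs : List Int) (hpre : Pre_englishy_py bs) :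
    englishy_py bs =
      pvVerdict (bs.length : Int)
        (bs.countP pvPrintableSet.contains : Int)
        (bs.countP (fun x =>
             ('A' ≤ Char.ofNat x.toNat && Char.ofNat x.toNat ≤ 'Z') ||
             ('a' ≤ Char.ofNat x.toNat && Char.ofNat x.toNat ≤ 'z')) : Int)
        (bs.countP (fun x => Char.ofNat x.toNat == ' ') : Int)
        (bs.countP (fun x =>
             PySem.Chars.isIn [PySem.Chars.lowerChar (Char.ofNat x.toNat)] ['a','e','i','o','u']) : Int) := by
  have hmap : bs.map (fun b => ((Char.ofNat b.toNat).toNat : Int)) = bs := by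
    conv_rhs => rw [← List.map_id bs]
    exact List.map_congr_left (fun b hb => pv_toNat_chr (hpre b hb).1 (hpre b hb).2)
  by_cases hnil : bs = []
  · subst hnil; simp [englishy_py, pvVerdict]
  · have hbs : bs.isEmpty = false := by simp [List.isEmpty_eq_false_iff, hnil]
    have hn0 : ¬ ((bs.length : Int) = 0) := by simpa using hnil
    simp only [englishy_py, List.isEmpty_map, hbs, Bool.false_eq_true, if_false,
      List.map_map, Function.comp_def, hmap, pv_count_singleton, PySem.Chars.lower,
      printable_ratio_py, PySem.List.sum_map_ite_one_zero, List.countP_map,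
      List.length_map]
    simp only [pvVerdict]
    rw [if_neg hn0]

-- ===== VERDICT (by name: the statement is the Claim_ definition above) =====
theorem englishy_py_spec : Claim_equal_englishy_py := by
  intro bs _ hpre
  unfold Spec_englishy_py
  rw [pv_a_eq bs hpre, pv_alt_eq bs]
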